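-- pv_equiv track=rewrite | github.com/EshantDazz/Privasure | src/utils/file_processing.py | deduplicate_person_contexts
-- ===== SOURCE A (Python) =====
-- def deduplicate_person_contexts(contextual_results1):
--     """
--     Properly deduplicate contexts between Person and PersonType categories
--     while preserving other categories
--     """
--     # Keep track of seen contexts for Person/PersonType
--     seen_contexts = {}
--     indices_to_remove = set()
--
--     # First pass: Collect all Person entries
--     for idx, result in enumerate(contextual_results1):
--         if result["entity_type"] == "Person":
--             context = result["context"]
--             if context not in seen_contexts:
--                 seen_contexts[context] = {
--                     "idx": idx,
--                     "type": "Person",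
--                     "entity_text": result["entity_text"],
--                 }
--
--     # Second pass: Check PersonType entries and mark duplicates for removal
--     for idx, result in enumerate(contextual_results1):
--         if result["entity_type"] == "PersonType":
--             context = result["context"]
--             if context in seen_contexts:
--                 indices_to_remove.add(idx)
--             else:
--                 seen_contexts[context] = {
--                     "idx": idx,
--                     "type": "PersonType",
--                     "entity_text": result["entity_text"],
--                 }
--
--     # Create new list without duplicate contexts
--     deduplicated_results = []
--
--     for idx, result in enumerate(contextual_results1):
--         if result["entity_type"] not in ["Person", "PersonType"]:
--             # Keep all non-Person/PersonType entries
--             deduplicated_results.append(result)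
--         elif idx not in indices_to_remove and result["context"] in seen_contexts:
--             if seen_contexts[result["context"]]["idx"] == idx:
--                 deduplicated_results.append(result)
--
--     return deduplicated_results
-- ===== SOURCE B (Python) =====
-- def deduplicate_person_contexts(contextual_results1):
--     """
--     Properly deduplicate contexts between Person and PersonType categories
--     while preserving other categories
--     """
--     # Contexts of all Person entries (computed up front)
--     person_contexts = {
--         r["context"] for r in contextual_results1 if r["entity_type"] == "Person"
--     }
--
--     deduplicated_results = []
--     kept_person = set()
--     kept_persontype = set()
--     for result in contextual_results1:
--         entity_type = result["entity_type"]
--         if entity_type == "Person":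
--             context = result["context"]
--             if context not in kept_person:
--                 kept_person.add(context)
--                 deduplicated_results.append(result)
--         elif entity_type == "PersonType":
--             context = result["context"]
--             if context not in person_contexts and context not in kept_persontype:
--                 kept_persontype.add(context)
--                 deduplicated_results.append(result)
--         else:
--             deduplicated_results.append(result)
--     return deduplicated_results
-- ===== Notes on version B (the rewrite author's own statement) =====
-- stated objective: simpler
-- what changed: Replaces A's three passes with index-ownership dict and indices_to_remove set by one precomputed set of Person contexts plus a single emission loop maintaining two seen-context sets.
import Mathlib
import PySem

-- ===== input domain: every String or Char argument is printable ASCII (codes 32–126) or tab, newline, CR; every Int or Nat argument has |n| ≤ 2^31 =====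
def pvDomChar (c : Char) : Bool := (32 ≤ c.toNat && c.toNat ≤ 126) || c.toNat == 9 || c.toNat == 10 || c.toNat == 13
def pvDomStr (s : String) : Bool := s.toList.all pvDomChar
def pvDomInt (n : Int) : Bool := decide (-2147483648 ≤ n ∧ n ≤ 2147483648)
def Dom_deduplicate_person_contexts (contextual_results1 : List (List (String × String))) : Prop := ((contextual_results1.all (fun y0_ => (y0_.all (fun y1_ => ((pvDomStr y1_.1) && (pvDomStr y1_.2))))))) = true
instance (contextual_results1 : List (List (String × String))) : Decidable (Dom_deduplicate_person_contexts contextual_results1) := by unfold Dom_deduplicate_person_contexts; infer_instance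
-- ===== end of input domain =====

-- B replaces A's three passes (index-ownership dict + indices_to_remove set) by one precomputed
-- set of Person contexts plus a single emission loop maintaining two seen-context sets (simpler).

-- ===== PORT A =====
-- a record is a Python dict, modelled as an association list; r[k] is dict lookup
def dGet (r : List (String × String)) (k : String) : String :=
  ((PySem.Dict.ofList r).get? k).getD ""

def hasKey (r : List (String × String)) (k : String) : Bool :=
  (PySem.Dict.ofList r).contains k

abbrev Seen := PySem.Dict String (Nat × String × String)

-- first pass: collect all Person entries (first context wins)
def a_pass1 : List (List (String × String)) → Nat → Seen → Seen
  | [], _, seen => seen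
  | r :: rest, idx, seen =>
    if dGet r "entity_type" = "Person" then
      if seen.contains (dGet r "context") = true then
        a_pass1 rest (idx + 1) seen
      else
        a_pass1 rest (idx + 1) (seen.insert (dGet r "context") (idx, "Person", dGet r "entity_text"))
    else a_pass1 rest (idx + 1) seen

-- second pass: check PersonType entries and mark duplicates for removal
def a_pass2 : List (List (String × String)) → Nat → Seen → PySem.Set Nat → Seen × PySem.Set Nat
  | [], _, seen, rem => (seen, rem)
  | r :: rest, idx, seen, rem =>
    if dGet r "entity_type" = "PersonType" then
      if seen.contains (dGet r "context") = true then
        a_pass2 rest (idx + 1) seen (PySem.Set.add rem idx)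
      else
        a_pass2 rest (idx + 1) (seen.insert (dGet r "context") (idx, "PersonType", dGet r "entity_text")) rem
    else a_pass2 rest (idx + 1) seen rem

-- third pass: create new list without duplicate contexts
def a_pass3 (seen : Seen) (rem : PySem.Set Nat) : List (List (String × String)) → Nat → List (List (String × String))
  | [], _ => []
  | r :: rest, idx =>
    if ¬ (dGet r "entity_type" = "Person" ∨ dGet r "entity_type" = "PersonType") then
      r :: a_pass3 seen rem rest (idx + 1)
    else if rem.contains idx = false ∧ seen.contains (dGet r "context") = true then
      if (seen.getD (dGet r "context") (0, "", "")).1 = idx then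
        r :: a_pass3 seen rem rest (idx + 1)
      else a_pass3 seen rem rest (idx + 1)
    else a_pass3 seen rem rest (idx + 1)

def deduplicate_person_contexts (contextual_results1 : List (List (String × String))) : List (List (String × String)) :=
  let seen1 := a_pass1 contextual_results1 0 PySem.Dict.empty
  let p2 := a_pass2 contextual_results1 0 seen1 PySem.Set.empty
  a_pass3 p2.1 p2.2 contextual_results1 0

-- ===== PORT B =====
-- single emission loop over the records, given the precomputed set of Person contexts
def b_emit (ps : PySem.Set String) : List (List (String × String)) → PySem.Set String → PySem.Set String → List (List (String × String))
  | [], _, _ => []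
  | r :: rest, kp, kpt =>
    if dGet r "entity_type" = "Person" then
      if (PySem.Set.contains kp (dGet r "context")) = true then
        b_emit ps rest kp kpt
      else r :: b_emit ps rest (PySem.Set.add kp (dGet r "context")) kpt
    else if dGet r "entity_type" = "PersonType" then
      if (PySem.Set.contains ps (dGet r "context")) = false ∧ (PySem.Set.contains kpt (dGet r "context")) = false then
        r :: b_emit ps rest kp (PySem.Set.add kpt (dGet r "context"))
      else b_emit ps rest kp kpt
    else r :: b_emit ps rest kp kpt

def deduplicate_person_contexts_alt (contextual_results1 : List (List (String × String))) : List (List (String × String)) :=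
  let person_contexts := PySem.Set.ofList
    ((contextual_results1.filter (fun r => dGet r "entity_type" == "Person")).map (fun r => dGet r "context"))
  b_emit person_contexts contextual_results1 PySem.Set.empty PySem.Set.empty

-- ===== PRECONDITION & SPEC =====
-- Pre_ excludes records that lack a key the Python reads (KeyError): "entity_type" everywhere, and
-- "context"/"entity_text" on Person/PersonType records. This is slightly narrower than A's domain:
-- A skips reading "entity_text" on a Person/PersonType record whose context was already seen
-- (see claim.json "cites" for such an excluded input, on which A and B agree).
def Pre_deduplicate_person_contexts (contextual_results1 : List (List (String × String))) : Prop :=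
  ∀ r ∈ contextual_results1, hasKey r "entity_type" = true ∧
    ((dGet r "entity_type" = "Person" ∨ dGet r "entity_type" = "PersonType") →
      hasKey r "context" = true ∧ hasKey r "entity_text" = true)

instance (contextual_results1 : List (List (String × String))) : Decidable (Pre_deduplicate_person_contexts contextual_results1) := by
  unfold Pre_deduplicate_person_contexts; infer_instance

def pvWitness_deduplicate_person_contexts : (List (List (String × String))) :=
  [[("entity_type", "Person"), ("context", "c"), ("entity_text", "Bob")],
   [("entity_type", "Organization"), ("context", "c")],
   [("entity_type", "PersonType"), ("context", "c"), ("entity_text", "employee")]]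

def Spec_deduplicate_person_contexts (contextual_results1 : List (List (String × String))) (out : List (List (String × String))) : Prop := out = deduplicate_person_contexts_alt contextual_results1
instance (contextual_results1 : List (List (String × String))) (out : List (List (String × String))) : Decidable (Spec_deduplicate_person_contexts contextual_results1 out) := by unfold Spec_deduplicate_person_contexts; infer_instance

-- ===== CLAIM (what is proved, stated in full; the proofs are below) =====
def Claim_equal_deduplicate_person_contexts : Prop := ∀ (contextual_results1 : List (List (String × String))), Dom_deduplicate_person_contexts contextual_results1 → Pre_deduplicate_person_contexts contextual_results1 → Spec_deduplicate_person_contexts contextual_results1 (deduplicate_person_contexts contextual_results1)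

-- ===== LEMMAS AND PROOFS =====

-- abbreviations for the proofs
def pP (r : List (String × String)) : Bool := decide (dGet r "entity_type" = "Person")
def pT (r : List (String × String)) : Bool := decide (dGet r "entity_type" = "PersonType")

-- index of the first record satisfying p with context c, counting from i
def firstIdx (p : List (String × String) → Bool) : List (List (String × String)) → Nat → String → Option Nat
  | [], _, _ => none
  | r :: rest, i, c => if p r = true ∧ dGet r "context" = c then some i else firstIdx p rest (i + 1) c

def sIdx? (seen : Seen) (c : String) : Option Nat := (seen.get? c).map (fun v => v.1)

def psOf (xs : List (List (String × String))) : PySem.Set String :=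
  PySem.Set.ofList ((xs.filter (fun r => dGet r "entity_type" == "Person")).map (fun r => dGet r "context"))

theorem firstIdx_append (p : List (String × String) → Bool) (as bs : List (List (String × String))) (i : Nat) (c : String) :
    firstIdx p (as ++ bs) i c = (firstIdx p as i c).or (firstIdx p bs (i + as.length) c) := by
  induction as generalizing i with
  | nil => simp [firstIdx]
  | cons a as ih =>
    simp only [List.cons_append, firstIdx]
    split
    · simp
    · rw [ih]
      simp only [List.length_cons]
      have : i + 1 + as.length = i + (as.length + 1) := by omega
      rw [this]

theorem firstIdx_bound (p : List (String × String) → Bool) (ys : List (List (String × String))) (i : Nat) (c : String) (j : Nat)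
    (h : firstIdx p ys i c = some j) : i ≤ j ∧ j < i + ys.length := by
  induction ys generalizing i j with
  | nil => simp [firstIdx] at h
  | cons a ys ih =>
    simp only [firstIdx] at h
    split at h
    · cases h; simp only [List.length_cons]; omega
    · have := ih (i + 1) j h
      simp only [List.length_cons]
      omega

theorem firstIdx_eq_none_iff (p : List (String × String) → Bool) (ys : List (List (String × String))) (i : Nat) (c : String) :
    firstIdx p ys i c = none ↔ ∀ r ∈ ys, ¬ (p r = true ∧ dGet r "context" = c) := by
  induction ys generalizing i with
  | nil => simp [firstIdx]
  | cons a ys ih =>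
    simp only [firstIdx]
    split
    · simp only [reduceCtorEq, false_iff]
      intro hall
      exact hall a (by simp) (by assumption)
    · rw [ih]
      constructor
      · intro hall r hr
        rcases List.mem_cons.1 hr with h | h
        · subst h; assumption
        · exact hall r h
      · intro hall r hr
        exact hall r (List.mem_cons_of_mem _ hr)

theorem psOf_contains (xs : List (List (String × String))) (c : String) :
    PySem.Set.contains (psOf xs) c = true ↔ ∃ r ∈ xs, pP r = true ∧ dGet r "context" = c := by
  simp only [psOf, PySem.Set.contains_iff, PySem.Set.mem_ofList, List.mem_map, List.mem_filter, pP]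
  constructor
  · rintro ⟨r, ⟨hr, hp⟩, hc⟩
    exact ⟨r, hr, by simpa using hp, hc⟩
  · rintro ⟨r, hr, hp, hc⟩
    exact ⟨r, ⟨hr, by simpa using hp⟩, hc⟩

theorem sIdx_pass1 (ys : List (List (String × String))) (i : Nat) (seen : Seen) (c : String) :
    sIdx? (a_pass1 ys i seen) c = (sIdx? seen c).or (firstIdx pP ys i c) := by
  induction ys generalizing i seen with
  | nil => simp [a_pass1, firstIdx]
  | cons r rest ih =>
    simp only [a_pass1, firstIdx, pP, decide_eq_true_eq]
    split_ifs with hp hc hcc hcc hq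
    · obtain ⟨-, hcc⟩ := hcc
      subst hcc
      rw [ih]
      have hs : (sIdx? seen (dGet r "context")).isSome = true := by
        rw [sIdx?, Option.isSome_map, ← PySem.Dict.contains_eq_isSome_get?]; exact hc
      rcases Option.isSome_iff_exists.1 hs with ⟨v, hv⟩
      rw [hv, Option.some_or, Option.some_or]
    · rw [ih]
    · obtain ⟨-, hcc⟩ := hcc
      subst hcc
      have h0 : sIdx? seen (dGet r "context") = none := by
        rw [sIdx?, Option.map_eq_none_iff]
        rw [Bool.not_eq_true] at hc
        exact (PySem.Dict.get?_eq_none_iff_contains _ _).2 hc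
      have h1 : sIdx? (seen.insert (dGet r "context") (i, "Person", dGet r "entity_text")) (dGet r "context") = some i := by
        rw [sIdx?, PySem.Dict.get?_insert_self]; rfl
      rw [ih, h0, h1, Option.some_or, Option.none_or]
    · have hcc' : c ≠ dGet r "context" := fun h => hcc ⟨hp, h.symm⟩
      have h1 : sIdx? (seen.insert (dGet r "context") (i, "Person", dGet r "entity_text")) c = sIdx? seen c := by
        rw [sIdx?, sIdx?, PySem.Dict.get?_insert_of_ne _ _ hcc']
      rw [ih, h1]
    · exact absurd hq.1 hp
    · rw [ih]

theorem sIdx_pass2 (ys : List (List (String × String))) (i : Nat) (seen : Seen) (rem : PySem.Set Nat) (c : String) :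
    sIdx? (a_pass2 ys i seen rem).1 c = (sIdx? seen c).or (firstIdx pT ys i c) := by
  induction ys generalizing i seen rem with
  | nil => simp [a_pass2, firstIdx]
  | cons r rest ih =>
    simp only [a_pass2, firstIdx, pT, decide_eq_true_eq]
    split_ifs with hp hc hcc hcc hq
    · obtain ⟨-, hcc⟩ := hcc
      subst hcc
      rw [ih]
      have hs : (sIdx? seen (dGet r "context")).isSome = true := by
        rw [sIdx?, Option.isSome_map, ← PySem.Dict.contains_eq_isSome_get?]; exact hc
      rcases Option.isSome_iff_exists.1 hs with ⟨v, hv⟩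
      rw [hv, Option.some_or, Option.some_or]
    · rw [ih]
    · obtain ⟨-, hcc⟩ := hcc
      subst hcc
      have h0 : sIdx? seen (dGet r "context") = none := by
        rw [sIdx?, Option.map_eq_none_iff]
        rw [Bool.not_eq_true] at hc
        exact (PySem.Dict.get?_eq_none_iff_contains _ _).2 hc
      have h1 : sIdx? (seen.insert (dGet r "context") (i, "PersonType", dGet r "entity_text")) (dGet r "context") = some i := by
        rw [sIdx?, PySem.Dict.get?_insert_self]; rfl
      rw [ih, h0, h1, Option.some_or, Option.none_or]
    · have hcc' : c ≠ dGet r "context" := fun h => hcc ⟨hp, h.symm⟩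
      have h1 : sIdx? (seen.insert (dGet r "context") (i, "PersonType", dGet r "entity_text")) c = sIdx? seen c := by
        rw [sIdx?, sIdx?, PySem.Dict.get?_insert_of_ne _ _ hcc']
      rw [ih, h1]
    · exact absurd hq.1 hp
    · rw [ih]

theorem pass2_append (as bs : List (List (String × String))) (i : Nat) (seen : Seen) (rem : PySem.Set Nat) :
    a_pass2 (as ++ bs) i seen rem = a_pass2 bs (i + as.length) (a_pass2 as i seen rem).1 (a_pass2 as i seen rem).2 := by
  induction as generalizing i seen rem with
  | nil => simp [a_pass2]
  | cons r rest ih =>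
    simp only [List.cons_append, a_pass2, List.length_cons]
    have harith : i + 1 + rest.length = i + (rest.length + 1) := by omega
    split_ifs with hp hc
    · rw [ih, harith]
    · rw [ih, harith]
    · rw [ih, harith]

theorem pass2_rem_mono (ys : List (List (String × String))) (i : Nat) (seen : Seen) (rem : PySem.Set Nat) (j : Nat)
    (h : PySem.Set.contains rem j = true) : PySem.Set.contains (a_pass2 ys i seen rem).2 j = true := by
  induction ys generalizing i seen rem with
  | nil => simpa [a_pass2] using h
  | cons r rest ih =>
    simp only [a_pass2]
    split_ifs with hp hc
    · exact ih _ _ _ (by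
        rw [PySem.Set.contains_iff] at h ⊢
        exact (PySem.Set.mem_add _ _ _).2 (Or.inl h))
    · exact ih _ _ _ h
    · exact ih _ _ _ h

theorem pass2_rem_range (ys : List (List (String × String))) (i : Nat) (seen : Seen) (rem : PySem.Set Nat) (j : Nat)
    (h : PySem.Set.contains (a_pass2 ys i seen rem).2 j = true) :
    PySem.Set.contains rem j = true ∨ (i ≤ j ∧ j < i + ys.length) := by
  induction ys generalizing i seen rem with
  | nil => left; simpa [a_pass2] using h
  | cons r rest ih =>
    simp only [a_pass2] at h
    simp only [List.length_cons]
    split_ifs at h with hp hc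
    · rcases ih _ _ _ h with h1 | h1
      · rw [PySem.Set.contains_iff] at h1
        rcases (PySem.Set.mem_add _ _ _).1 h1 with h2 | h2
        · left; rw [PySem.Set.contains_iff]; exact h2
        · right; omega
      · right; omega
    · rcases ih _ _ _ h with h1 | h1
      · left; exact h1
      · right; omega
    · rcases ih _ _ _ h with h1 | h1
      · left; exact h1
      · right; omega

theorem firstIdx_isSome_iff (p : List (String × String) → Bool) (ys : List (List (String × String))) (i : Nat) (c : String) :
    (firstIdx p ys i c).isSome = true ↔ ∃ r ∈ ys, p r = true ∧ dGet r "context" = c := by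
  rw [Option.isSome_iff_ne_none, ne_eq, firstIdx_eq_none_iff]
  push Not
  simp

theorem contains_sIdx (seen : Seen) (c : String) :
    seen.contains c = (sIdx? seen c).isSome := by
  rw [PySem.Dict.contains_eq_isSome_get?, sIdx?, Option.isSome_map]

theorem sIdx_empty (c : String) : sIdx? (PySem.Dict.empty : Seen) c = none := by
  rw [sIdx?, PySem.Dict.get?_empty]; rfl

theorem sIdx_seen2 (xs : List (List (String × String))) (c : String) :
    sIdx? (a_pass2 xs 0 (a_pass1 xs 0 PySem.Dict.empty) PySem.Set.empty).1 c
      = (firstIdx pP xs 0 c).or (firstIdx pT xs 0 c) := by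
  rw [sIdx_pass2, sIdx_pass1, sIdx_empty, Option.none_or]

theorem ps_iff_firstP (xs : List (List (String × String))) (c : String) :
    PySem.Set.contains (psOf xs) c = true ↔ (firstIdx pP xs 0 c).isSome = true := by
  rw [psOf_contains, firstIdx_isSome_iff]

theorem rem2_at (pre : List (List (String × String))) (r : List (String × String)) (ys : List (List (String × String))) :
    PySem.Set.contains (a_pass2 (pre ++ r :: ys) 0 (a_pass1 (pre ++ r :: ys) 0 PySem.Dict.empty) PySem.Set.empty).2 pre.length = true ↔
      (pT r = true ∧ (PySem.Set.contains (psOf (pre ++ r :: ys)) (dGet r "context") = true ∨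
        ∃ r' ∈ pre, pT r' = true ∧ dGet r' "context" = dGet r "context")) := by
  rw [pass2_append]
  have hempty : ∀ j : Nat, PySem.Set.contains (PySem.Set.empty : PySem.Set Nat) j = true → False := by
    intro j h
    rw [PySem.Set.contains_iff] at h
    simp [PySem.Set.empty] at h
  have hrange : ∀ j : Nat,
      PySem.Set.contains (a_pass2 pre 0 (a_pass1 (pre ++ r :: ys) 0 PySem.Dict.empty) PySem.Set.empty).2 j = true → j < pre.length := by
    intro j h
    rcases pass2_rem_range _ _ _ _ _ h with h1 | h1
    · exact absurd h1 (fun h1 => hempty j h1)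
    · omega
  have hScont : (a_pass2 pre 0 (a_pass1 (pre ++ r :: ys) 0 PySem.Dict.empty) PySem.Set.empty).1.contains (dGet r "context") = true ↔
      ((firstIdx pP (pre ++ r :: ys) 0 (dGet r "context")).isSome = true ∨
        (firstIdx pT pre 0 (dGet r "context")).isSome = true) := by
    rw [contains_sIdx, sIdx_pass2, sIdx_pass1, sIdx_empty, Option.none_or, Option.isSome_or, Bool.or_eq_true]
  rw [Nat.zero_add]
  simp only [a_pass2]
  split_ifs with hp hc
  · -- PersonType, context already seen: index added
    have hadd : PySem.Set.contains (PySem.Set.add (a_pass2 pre 0 (a_pass1 (pre ++ r :: ys) 0 PySem.Dict.empty) PySem.Set.empty).2 pre.length) pre.length = true := by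
      rw [PySem.Set.contains_iff]
      exact (PySem.Set.mem_add _ _ _).2 (Or.inr rfl)
    constructor
    · intro _
      refine ⟨by simp [pT, hp], ?_⟩
      rcases hScont.1 hc with h1 | h1
      · exact Or.inl ((ps_iff_firstP _ _).2 h1)
      · rcases (firstIdx_isSome_iff _ _ _ _).1 h1 with ⟨r', hr', hp', hc'⟩
        exact Or.inr ⟨r', hr', hp', hc'⟩
    · intro _
      exact pass2_rem_mono _ _ _ _ _ hadd
  · -- PersonType, context fresh: nothing added at this index
    constructor
    · intro h
      rcases pass2_rem_range _ _ _ _ _ h with h1 | h1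
      · exact absurd (hrange _ h1) (by omega)
      · omega
    · rintro ⟨-, h⟩
      exfalso
      apply hc
      rw [hScont]
      rcases h with h | h
      · exact Or.inl ((ps_iff_firstP _ _).1 h)
      · exact Or.inr ((firstIdx_isSome_iff _ _ _ _).2 h)
  · -- not a PersonType
    constructor
    · intro h
      rcases pass2_rem_range _ _ _ _ _ h with h1 | h1
      · exact absurd (hrange _ h1) (by omega)
      · omega
    · rintro ⟨h, -⟩
      exact absurd (of_decide_eq_true h) hp

theorem main_lemma (xs : List (List (String × String))) :
    ∀ (ys pre : List (List (String × String))) (kp kpt : PySem.Set String),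
    xs = pre ++ ys →
    (∀ c, PySem.Set.contains kp c = true ↔ ∃ r' ∈ pre, pP r' = true ∧ dGet r' "context" = c) →
    (∀ c, PySem.Set.contains kpt c = true ↔
      ((∃ r' ∈ pre, pT r' = true ∧ dGet r' "context" = c) ∧ ¬ PySem.Set.contains (psOf xs) c = true)) →
    a_pass3 (a_pass2 xs 0 (a_pass1 xs 0 PySem.Dict.empty) PySem.Set.empty).1
            (a_pass2 xs 0 (a_pass1 xs 0 PySem.Dict.empty) PySem.Set.empty).2 ys pre.length
      = b_emit (psOf xs) ys kp kpt := by
  intro ys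
  induction ys with
  | nil => intro pre kp kpt _ _ _; simp [a_pass3, b_emit]
  | cons r ys ih =>
    intro pre kp kpt hxs hkp hkpt
    have hlen : (pre ++ [r]).length = pre.length + 1 := by simp
    have hxs' : xs = (pre ++ [r]) ++ ys := by rw [hxs]; simp
    have hmemr : r ∈ xs := by rw [hxs]; exact List.mem_append_right _ (List.mem_cons_self)
    simp only [a_pass3, b_emit]
    by_cases hP : dGet r "entity_type" = "Person"
    · rw [if_neg (fun h => h (Or.inl hP)), if_pos hP]
      have hpPr : pP r = true := by simp [pP, hP]
      have hpTr : pT r = false := by simp [pT]; rw [hP]; intro h; exact absurd h (by decide)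
      have hrem : PySem.Set.contains (a_pass2 xs 0 (a_pass1 xs 0 PySem.Dict.empty) PySem.Set.empty).2 pre.length = false := by
        rw [Bool.eq_false_iff, ne_eq]
        rw [hxs, rem2_at]
        rintro ⟨h, -⟩
        rw [hpTr] at h
        exact absurd h (by decide)
      have hfxs : firstIdx pP xs 0 (dGet r "context")
          = (firstIdx pP pre 0 (dGet r "context")).or (some pre.length) := by
        rw [hxs, firstIdx_append, Nat.zero_add]
        congr 1
        simp [firstIdx, hpPr]
      have hseen : (a_pass2 xs 0 (a_pass1 xs 0 PySem.Dict.empty) PySem.Set.empty).1.contains (dGet r "context") = true := by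
        rw [contains_sIdx, sIdx_seen2, Option.isSome_or, Bool.or_eq_true, hfxs]
        left
        cases h : firstIdx pP pre 0 (dGet r "context") with
        | none => rw [Option.none_or]; rfl
        | some j => rw [Option.some_or]; rfl
      rw [if_pos ⟨hrem, hseen⟩]
      by_cases hkpc : PySem.Set.contains kp (dGet r "context") = true
      · -- duplicate Person context: both drop the record
        rw [if_pos hkpc]
        rcases (hkp _).1 hkpc with ⟨r', hr', hp', hc'⟩
        have hj : ∃ j, firstIdx pP pre 0 (dGet r "context") = some j := by
          have := (firstIdx_isSome_iff pP pre 0 (dGet r "context")).2 ⟨r', hr', hp', hc'⟩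
          exact Option.isSome_iff_exists.1 this
        rcases hj with ⟨j, hj⟩
        have hjlt : j < pre.length := by have := (firstIdx_bound _ _ _ _ _ hj).2; omega
        have hgetd : ((a_pass2 xs 0 (a_pass1 xs 0 PySem.Dict.empty) PySem.Set.empty).1.getD (dGet r "context") (0, "", "")).1 = j := by
          have hs : sIdx? (a_pass2 xs 0 (a_pass1 xs 0 PySem.Dict.empty) PySem.Set.empty).1 (dGet r "context") = some j := by
            rw [sIdx_seen2, hfxs, hj, Option.some_or, Option.some_or]
          rcases Option.map_eq_some_iff.1 hs with ⟨v, hv, hv1⟩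
          rw [PySem.Dict.getD_eq_get?_getD, hv]
          exact hv1
        rw [if_neg (by rw [hgetd]; omega)]
        rw [← hlen]
        apply ih _ kp kpt hxs'
        · intro c'
          rw [hkp]
          constructor
          · rintro ⟨r'', hr'', h1, h2⟩
            exact ⟨r'', List.mem_append_left _ hr'', h1, h2⟩
          · rintro ⟨r'', hr'', h1, h2⟩
            rcases List.mem_append.1 hr'' with h | h
            · exact ⟨r'', h, h1, h2⟩
            · rw [List.mem_singleton.1 h] at h2
              exact ⟨r', hr', hp', hc'.trans h2⟩
        · intro c'
          rw [hkpt]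
          constructor
          · rintro ⟨⟨r'', hr'', h1, h2⟩, h3⟩
            exact ⟨⟨r'', List.mem_append_left _ hr'', h1, h2⟩, h3⟩
          · rintro ⟨⟨r'', hr'', h1, h2⟩, h3⟩
            rcases List.mem_append.1 hr'' with h | h
            · exact ⟨⟨r'', h, h1, h2⟩, h3⟩
            · rw [List.mem_singleton.1 h] at h1
              rw [hpTr] at h1
              exact absurd h1 (by decide)
      · -- first Person with this context: both keep the record
        rw [if_neg hkpc]
        have hpre : firstIdx pP pre 0 (dGet r "context") = none := by
          cases h : firstIdx pP pre 0 (dGet r "context") with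
          | none => rfl
          | some j =>
            exfalso
            have : (firstIdx pP pre 0 (dGet r "context")).isSome = true := by rw [h]; rfl
            rcases (firstIdx_isSome_iff _ _ _ _).1 this with ⟨r', hr', h1, h2⟩
            exact hkpc ((hkp _).2 ⟨r', hr', h1, h2⟩)
        have hgetd : ((a_pass2 xs 0 (a_pass1 xs 0 PySem.Dict.empty) PySem.Set.empty).1.getD (dGet r "context") (0, "", "")).1 = pre.length := by
          have hs : sIdx? (a_pass2 xs 0 (a_pass1 xs 0 PySem.Dict.empty) PySem.Set.empty).1 (dGet r "context") = some pre.length := by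
            rw [sIdx_seen2, hfxs, hpre, Option.none_or, Option.some_or]
          rcases Option.map_eq_some_iff.1 hs with ⟨v, hv, hv1⟩
          rw [PySem.Dict.getD_eq_get?_getD, hv]
          exact hv1
        rw [if_pos hgetd]
        congr 1
        rw [← hlen]
        apply ih _ _ kpt hxs'
        · intro c'
          rw [PySem.Set.contains_iff, PySem.Set.mem_add, ← PySem.Set.contains_iff, hkp]
          constructor
          · rintro (⟨r'', hr'', h1, h2⟩ | h)
            · exact ⟨r'', List.mem_append_left _ hr'', h1, h2⟩
            · exact ⟨r, List.mem_append_right _ (List.mem_singleton.2 rfl), hpPr, h.symm⟩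
          · rintro ⟨r'', hr'', h1, h2⟩
            rcases List.mem_append.1 hr'' with h | h
            · exact Or.inl ⟨r'', h, h1, h2⟩
            · rw [List.mem_singleton.1 h] at h2
              exact Or.inr h2.symm
        · intro c'
          rw [hkpt]
          constructor
          · rintro ⟨⟨r'', hr'', h1, h2⟩, h3⟩
            exact ⟨⟨r'', List.mem_append_left _ hr'', h1, h2⟩, h3⟩
          · rintro ⟨⟨r'', hr'', h1, h2⟩, h3⟩
            rcases List.mem_append.1 hr'' with h | h
            · exact ⟨⟨r'', h, h1, h2⟩, h3⟩
            · rw [List.mem_singleton.1 h] at h1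
              rw [hpTr] at h1
              exact absurd h1 (by decide)
    · by_cases hT : dGet r "entity_type" = "PersonType"
      · rw [if_neg (fun h => h (Or.inr hT)), if_neg hP, if_pos hT]
        have hpPr : pP r = false := by simp [pP]; rw [hT]; intro h; exact absurd h (by decide)
        have hpTr : pT r = true := by simp [pT, hT]
        have hremiff : PySem.Set.contains (a_pass2 xs 0 (a_pass1 xs 0 PySem.Dict.empty) PySem.Set.empty).2 pre.length = true ↔
            (PySem.Set.contains (psOf xs) (dGet r "context") = true ∨
              ∃ r' ∈ pre, pT r' = true ∧ dGet r' "context" = dGet r "context") := by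
          rw [hxs, rem2_at]
          rw [← hxs]
          constructor
          · rintro ⟨-, h⟩; exact h
          · intro h; exact ⟨hpTr, h⟩
        by_cases hps : PySem.Set.contains (psOf xs) (dGet r "context") = true
        · -- context belongs to a Person somewhere: both drop
          have hA : ¬ (PySem.Set.contains (a_pass2 xs 0 (a_pass1 xs 0 PySem.Dict.empty) PySem.Set.empty).2 pre.length = false ∧
              (a_pass2 xs 0 (a_pass1 xs 0 PySem.Dict.empty) PySem.Set.empty).1.contains (dGet r "context") = true) := by
            rintro ⟨h1, -⟩
            have h2 := hremiff.2 (Or.inl hps)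
            exact absurd (h1.symm.trans h2) (by decide)
          have hB : ¬ (PySem.Set.contains (psOf xs) (dGet r "context") = false ∧
              PySem.Set.contains kpt (dGet r "context") = false) := by
            rintro ⟨h1, -⟩
            exact absurd (hps.symm.trans h1) (by decide)
          rw [if_neg hA, if_neg hB]
          rw [← hlen]
          apply ih _ kp kpt hxs'
          · intro c'
            rw [hkp]
            constructor
            · rintro ⟨r'', hr'', h1, h2⟩
              exact ⟨r'', List.mem_append_left _ hr'', h1, h2⟩
            · rintro ⟨r'', hr'', h1, h2⟩
              rcases List.mem_append.1 hr'' with h | h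
              · exact ⟨r'', h, h1, h2⟩
              · rw [List.mem_singleton.1 h] at h1
                rw [hpPr] at h1
                exact absurd h1 (by decide)
          · intro c'
            rw [hkpt]
            constructor
            · rintro ⟨⟨r'', hr'', h1, h2⟩, h3⟩
              exact ⟨⟨r'', List.mem_append_left _ hr'', h1, h2⟩, h3⟩
            · rintro ⟨⟨r'', hr'', h1, h2⟩, h3⟩
              rcases List.mem_append.1 hr'' with h | h
              · exact ⟨⟨r'', h, h1, h2⟩, h3⟩
              · rw [List.mem_singleton.1 h] at h2
                rw [← h2] at h3
                exact absurd hps h3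
        · by_cases hkptc : PySem.Set.contains kpt (dGet r "context") = true
          · -- duplicate PersonType context: both drop
            have hpt : ∃ r' ∈ pre, pT r' = true ∧ dGet r' "context" = dGet r "context" :=
              ((hkpt _).1 hkptc).1
            have hA : ¬ (PySem.Set.contains (a_pass2 xs 0 (a_pass1 xs 0 PySem.Dict.empty) PySem.Set.empty).2 pre.length = false ∧
                (a_pass2 xs 0 (a_pass1 xs 0 PySem.Dict.empty) PySem.Set.empty).1.contains (dGet r "context") = true) := by
              rintro ⟨h1, -⟩
              have h2 := hremiff.2 (Or.inr hpt)
              exact absurd (h1.symm.trans h2) (by decide)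
            have hB : ¬ (PySem.Set.contains (psOf xs) (dGet r "context") = false ∧
                PySem.Set.contains kpt (dGet r "context") = false) := by
              rintro ⟨-, h2⟩
              exact absurd (hkptc.symm.trans h2) (by decide)
            rw [if_neg hA, if_neg hB]
            rw [← hlen]
            apply ih _ kp kpt hxs'
            · intro c'
              rw [hkp]
              constructor
              · rintro ⟨r'', hr'', h1, h2⟩
                exact ⟨r'', List.mem_append_left _ hr'', h1, h2⟩
              · rintro ⟨r'', hr'', h1, h2⟩
                rcases List.mem_append.1 hr'' with h | h
                · exact ⟨r'', h, h1, h2⟩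
                · rw [List.mem_singleton.1 h] at h1
                  rw [hpPr] at h1
                  exact absurd h1 (by decide)
            · intro c'
              rw [hkpt]
              constructor
              · rintro ⟨⟨r'', hr'', h1, h2⟩, h3⟩
                exact ⟨⟨r'', List.mem_append_left _ hr'', h1, h2⟩, h3⟩
              · rintro ⟨⟨r'', hr'', h1, h2⟩, h3⟩
                rcases List.mem_append.1 hr'' with h | h
                · exact ⟨⟨r'', h, h1, h2⟩, h3⟩
                · rw [List.mem_singleton.1 h] at h2
                  rw [← h2] at h3 ⊢
                  exact ⟨hpt, h3⟩
          · -- first fresh PersonType context: both keep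
            have hnopre : ¬ ∃ r' ∈ pre, pT r' = true ∧ dGet r' "context" = dGet r "context" := by
              rintro h
              exact hkptc ((hkpt _).2 ⟨h, hps⟩)
            have hrem : PySem.Set.contains (a_pass2 xs 0 (a_pass1 xs 0 PySem.Dict.empty) PySem.Set.empty).2 pre.length = false := by
              rw [Bool.eq_false_iff, ne_eq, hremiff]
              rintro (h | h)
              · exact hps h
              · exact hnopre h
            have hfP : firstIdx pP xs 0 (dGet r "context") = none := by
              cases h : firstIdx pP xs 0 (dGet r "context") with
              | none => rfl
              | some j =>
                exfalso
                exact hps ((ps_iff_firstP _ _).2 (by rw [h]; rfl))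
            have hfT : firstIdx pT xs 0 (dGet r "context") = some pre.length := by
              rw [hxs, firstIdx_append, Nat.zero_add]
              have hpre : firstIdx pT pre 0 (dGet r "context") = none := by
                rw [firstIdx_eq_none_iff]
                rintro r' hr' ⟨h1, h2⟩
                exact hnopre ⟨r', hr', h1, h2⟩
              rw [hpre, Option.none_or]
              simp [firstIdx, hpTr]
            have hseen : (a_pass2 xs 0 (a_pass1 xs 0 PySem.Dict.empty) PySem.Set.empty).1.contains (dGet r "context") = true := by
              rw [contains_sIdx, sIdx_seen2, hfP, hfT]; rfl
            rw [if_pos ⟨hrem, hseen⟩]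
            have hgetd : ((a_pass2 xs 0 (a_pass1 xs 0 PySem.Dict.empty) PySem.Set.empty).1.getD (dGet r "context") (0, "", "")).1 = pre.length := by
              have hs : sIdx? (a_pass2 xs 0 (a_pass1 xs 0 PySem.Dict.empty) PySem.Set.empty).1 (dGet r "context") = some pre.length := by
                rw [sIdx_seen2, hfP, hfT, Option.none_or]
              rcases Option.map_eq_some_iff.1 hs with ⟨v, hv, hv1⟩
              rw [PySem.Dict.getD_eq_get?_getD, hv]
              exact hv1
            rw [if_pos hgetd, if_pos ⟨Bool.eq_false_iff.2 hps, Bool.eq_false_iff.2 hkptc⟩]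
            congr 1
            rw [← hlen]
            apply ih _ kp _ hxs'
            · intro c'
              rw [hkp]
              constructor
              · rintro ⟨r'', hr'', h1, h2⟩
                exact ⟨r'', List.mem_append_left _ hr'', h1, h2⟩
              · rintro ⟨r'', hr'', h1, h2⟩
                rcases List.mem_append.1 hr'' with h | h
                · exact ⟨r'', h, h1, h2⟩
                · rw [List.mem_singleton.1 h] at h1
                  rw [hpPr] at h1
                  exact absurd h1 (by decide)
            · intro c'
              rw [PySem.Set.contains_iff, PySem.Set.mem_add, ← PySem.Set.contains_iff, hkpt]
              constructor
              · rintro (⟨⟨r'', hr'', h1, h2⟩, h3⟩ | h)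
                · exact ⟨⟨r'', List.mem_append_left _ hr'', h1, h2⟩, h3⟩
                · rw [h]
                  exact ⟨⟨r, List.mem_append_right _ (List.mem_singleton.2 rfl), hpTr, rfl⟩, hps⟩
              · rintro ⟨⟨r'', hr'', h1, h2⟩, h3⟩
                rcases List.mem_append.1 hr'' with h | h
                · exact Or.inl ⟨⟨r'', h, h1, h2⟩, h3⟩
                · rw [List.mem_singleton.1 h] at h2
                  exact Or.inr h2.symm
      · -- neither Person nor PersonType: both keep
        rw [if_pos (by rintro (h | h); exact hP h; exact hT h), if_neg hP, if_neg hT]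
        have hpPr : pP r = false := by simp [pP]; exact hP
        have hpTr : pT r = false := by simp [pT]; exact hT
        congr 1
        rw [← hlen]
        apply ih _ kp kpt hxs'
        · intro c'
          rw [hkp]
          constructor
          · rintro ⟨r'', hr'', h1, h2⟩
            exact ⟨r'', List.mem_append_left _ hr'', h1, h2⟩
          · rintro ⟨r'', hr'', h1, h2⟩
            rcases List.mem_append.1 hr'' with h | h
            · exact ⟨r'', h, h1, h2⟩
            · rw [List.mem_singleton.1 h] at h1
              rw [hpPr] at h1
              exact absurd h1 (by decide)
        · intro c'
          rw [hkpt]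
          constructor
          · rintro ⟨⟨r'', hr'', h1, h2⟩, h3⟩
            exact ⟨⟨r'', List.mem_append_left _ hr'', h1, h2⟩, h3⟩
          · rintro ⟨⟨r'', hr'', h1, h2⟩, h3⟩
            rcases List.mem_append.1 hr'' with h | h
            · exact ⟨⟨r'', h, h1, h2⟩, h3⟩
            · rw [List.mem_singleton.1 h] at h1
              rw [hpTr] at h1
              exact absurd h1 (by decide)

theorem deduplicate_person_contexts_spec : Claim_equal_deduplicate_person_contexts := by
  intro xs _ _
  unfold Spec_deduplicate_person_contexts
  show deduplicate_person_contexts xs = deduplicate_person_contexts_alt xs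
  unfold deduplicate_person_contexts deduplicate_person_contexts_alt
  have h := main_lemma xs xs [] PySem.Set.empty PySem.Set.empty rfl
    (by intro c; simp [PySem.Set.empty])
    (by intro c; simp [PySem.Set.empty])
  simpa [psOf] using h
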